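-- pv_equiv track=rewrite | github.com/rosscon/rosscon_advent_of_code | 2019/day_08/02.py | render_image_from_layers
-- ===== SOURCE A (Python) =====
-- def render_image_from_layers(layers, width, height):
--
--     image = {}
--
--     for y in range(height):
--         image[y] = {}
--         for x in range(width):
--             image[y][x] = -1
--             for l in range(len(layers)):
--
--                 if image[y][x] == -1: #Not been set yet
--                     image[y][x] = layers[l][y][x]
--
--                 if image[y][x] == 2: #Pixel is transparrent
--                     image[y][x] = layers[l][y][x]
--
--
--
--     return image
-- ===== SOURCE B (Python) =====
-- def render_image_from_layers(layers, width, height):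
--     # Painter's algorithm: initialise from the back layer, then paint the layers
--     # back-to-front, a nearer opaque pixel (neither -1 nor 2) overwriting.
--     image = {y: {x: (layers[-1][y][x] if layers else -1) for x in range(width)}
--              for y in range(height)}
--     for layer in reversed(layers):
--         for y in range(height):
--             for x in range(width):
--                 p = layer[y][x]
--                 if p != -1 and p != 2:
--                     image[y][x] = p
--     return image
-- ===== Notes on version B (the rewrite author's own statement) =====
-- stated objective: alternative
-- what changed: A's pixel-major forward scan maintaining a transparency sentinel per pixel is replaced by a painter's algorithm: the image is initialised from the back layer and the layers are painted back-to-front, each opaque pixel (neither -1 nor 2) overwriting; the test moves from the accumulated image state to the layer pixel itself.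
-- outside the precondition, e.g. on render_image_from_layers([[[5]], []], 1, 1): A returns {0: {0: 5}}, B raises IndexError
import Mathlib
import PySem

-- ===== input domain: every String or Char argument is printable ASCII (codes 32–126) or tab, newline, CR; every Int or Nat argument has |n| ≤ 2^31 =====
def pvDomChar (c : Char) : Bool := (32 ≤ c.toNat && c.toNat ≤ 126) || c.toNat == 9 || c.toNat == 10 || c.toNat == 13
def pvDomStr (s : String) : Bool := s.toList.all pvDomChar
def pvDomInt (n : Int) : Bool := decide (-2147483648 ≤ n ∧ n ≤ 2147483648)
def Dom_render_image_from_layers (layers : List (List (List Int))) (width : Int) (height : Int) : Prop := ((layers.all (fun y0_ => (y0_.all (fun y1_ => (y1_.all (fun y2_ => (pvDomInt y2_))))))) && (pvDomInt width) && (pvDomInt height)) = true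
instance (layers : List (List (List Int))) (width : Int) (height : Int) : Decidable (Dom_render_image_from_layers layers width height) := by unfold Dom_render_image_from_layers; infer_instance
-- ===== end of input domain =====

-- B renders by a painter's algorithm (back-to-front over the layers, opaque pixels overwrite) instead of A's per-pixel forward scan with a sentinel; alternative decomposition, same cost.


-- ===== PORT A =====
-- Pixel-major: for each y, for each x, start at -1 and scan l over range(len(layers)).
-- The dicts image / image[y] receive fresh strictly increasing keys, so building them
-- is the map over the key ranges.  layers[l][y][x] is ported with pyGetD (Pre_ keeps
-- every performed access in range, where Python would otherwise raise IndexError).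
def render_image_from_layers (layers : List (List (List Int))) (width : Int) (height : Int) : List (Int × List (Int × Int)) :=
  (PySem.List.pyRange 0 height 1).map (fun y =>
    (y, (PySem.List.pyRange 0 width 1).map (fun x =>
      (x, (PySem.List.pyRange 0 (layers.length : Int) 1).foldl (fun v l =>
            let v1 := if v = -1 then
                PySem.List.pyGetD (PySem.List.pyGetD (PySem.List.pyGetD layers l []) y []) x 0
              else v
            if v1 = 2 then
                PySem.List.pyGetD (PySem.List.pyGetD (PySem.List.pyGetD layers l []) y []) x 0
              else v1) (-1)))))

-- ===== PORT B =====
-- Painter's algorithm: the image starts as the back layer (-1 when there are no layers)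
-- and the layers are painted back-to-front; an opaque pixel p (neither -1 nor 2) of a
-- nearer layer overwrites the pixel underneath it.
def pvPaintPass (image : List (Int × List (Int × Int))) (layer : List (List Int)) : List (Int × List (Int × Int)) :=
  image.map (fun yr => (yr.1, yr.2.map (fun xv =>
    (xv.1,
      let p := PySem.List.pyGetD (PySem.List.pyGetD layer yr.1 []) xv.1 0
      if p ≠ -1 ∧ p ≠ 2 then p else xv.2))))

def render_image_from_layers_alt (layers : List (List (List Int))) (width : Int) (height : Int) : List (Int × List (Int × Int)) :=
  layers.reverse.foldl pvPaintPass
    ((PySem.List.pyRange 0 height 1).map (fun y =>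
      (y, (PySem.List.pyRange 0 width 1).map (fun x =>
        (x, if layers = [] then (-1 : Int)
            else PySem.List.pyGetD (PySem.List.pyGetD (PySem.List.pyGetD layers (-1) []) y []) x 0)))))

-- ===== PRECONDITION & SPEC =====
-- Pre_ requires every layer to be a full height×width grid whenever any pixel is rendered
-- (0 < width and 0 < height); A (and B) raise IndexError on short layers except,
-- data-dependently, when a short row is never read because an earlier layer already
-- determined that pixel — those accidental escapes are excluded with the rest.
def Pre_render_image_from_layers (layers : List (List (List Int))) (width : Int) (height : Int) : Prop :=
  0 < width → 0 < height → ∀ L ∈ layers, height ≤ (L.length : Int) ∧ ∀ R ∈ L.take height.toNat, width ≤ (R.length : Int)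
instance (layers : List (List (List Int))) (width : Int) (height : Int) : Decidable (Pre_render_image_from_layers layers width height) := by unfold Pre_render_image_from_layers; infer_instance

def pvWitness_render_image_from_layers : List (List (List Int)) × Int × Int := ([[[2, 0], [1, 2]], [[5, 5], [5, 5]]], 2, 2)

def Spec_render_image_from_layers (layers : List (List (List Int))) (width : Int) (height : Int) (out : List (Int × List (Int × Int))) : Prop := out = render_image_from_layers_alt layers width height
instance (layers : List (List (List Int))) (width : Int) (height : Int) (out : List (Int × List (Int × Int))) : Decidable (Spec_render_image_from_layers layers width height out) := by unfold Spec_render_image_from_layers; infer_instance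

-- ===== CLAIM (what is proved, stated in full; the proofs are below) =====
def Claim_equal_render_image_from_layers : Prop := ∀ (layers : List (List (List Int))) (width : Int) (height : Int), Dom_render_image_from_layers layers width height → Pre_render_image_from_layers layers width height → Spec_render_image_from_layers layers width height (render_image_from_layers layers width height)

-- ===== LEMMAS AND PROOFS =====

-- A's two chained ifs compute the same update as a single disjunctive if.
lemma step_eq (g v : Int) :
    (let v1 := if v = -1 then g else v; if v1 = 2 then g else v1)
      = (if v = -1 ∨ v = 2 then g else v) := by
  by_cases h1 : v = -1 <;> by_cases h2 : v = 2 <;> simp [h1, h2]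

-- "First opaque value in vs, else the last value of vs, else t": the common
-- characterisation both per-pixel computations are reduced to.
def pvFront (t : Int) : List Int → Int
  | [] => t
  | [g] => g
  | g :: rest => if g ≠ -1 ∧ g ≠ 2 then g else pvFront t rest

lemma pvFront_irrel (a b : Int) : ∀ vs : List Int, vs ≠ [] → pvFront a vs = pvFront b vs
  | [g], _ => rfl
  | g :: r :: rest, _ => by
    by_cases h : g ≠ -1 ∧ g ≠ 2 <;>
      simp [pvFront, h, pvFront_irrel a b (r :: rest) (by simp)]

-- An opaque state absorbs A's forward fold.
lemma foldA_absorb (vs : List Int) (v : Int) (h1 : v ≠ -1) (h2 : v ≠ 2) :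
    vs.foldl (fun v g => if v = -1 ∨ v = 2 then g else v) v = v := by
  induction vs with
  | nil => rfl
  | cons g rest ih => simpa [h1, h2] using ih

-- A's forward fold from a transparent start computes pvFront.
lemma foldA_char (vs : List Int) : ∀ t : Int, (t = -1 ∨ t = 2) →
    vs.foldl (fun v g => if v = -1 ∨ v = 2 then g else v) t = pvFront t vs := by
  induction vs with
  | nil => intro t _; rfl
  | cons g rest ih =>
    intro t ht
    simp only [List.foldl_cons, if_pos ht]
    match rest with
    | [] => simp [pvFront]
    | r :: rs =>
      by_cases hg : g ≠ -1 ∧ g ≠ 2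
      · simp [pvFront, hg, foldA_absorb (r :: rs) g hg.1 hg.2]
      · have hg' : g = -1 ∨ g = 2 := by tauto
        rw [ih g hg']
        simp [pvFront, hg, pvFront_irrel t g (r :: rs) (by simp)]

-- B's backward (foldr) paint, seeded with the last value, also computes pvFront.
lemma foldB_char (vs : List Int) : ∀ t : Int,
    vs.foldr (fun g v => if g ≠ -1 ∧ g ≠ 2 then g else v) (vs.getLastD t) = pvFront t vs := by
  induction vs with
  | nil => intro t; rfl
  | cons g rest ih =>
    intro t
    rw [List.getLastD_cons, List.foldr_cons]
    match rest with
    | [] => by_cases hg : g ≠ -1 ∧ g ≠ 2 <;> simp [pvFront, hg]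
    | r :: rs =>
      rw [ih g]
      by_cases hg : g ≠ -1 ∧ g ≠ 2 <;>
        simp [pvFront, hg, pvFront_irrel t g (r :: rs) (by simp)]

-- The two per-pixel computations agree, over any per-layer pixel extractor.
lemma pixel_eq (val : List (List Int) → Int) (ls : List (List (List Int))) :
    ls.foldl (fun v L => if v = -1 ∨ v = 2 then val L else v) (-1)
      = ls.foldr (fun L v => if val L ≠ -1 ∧ val L ≠ 2 then val L else v)
          (if h : ls = [] then -1 else val (ls.getLast h)) := by
  have hmapl := List.foldl_map (f := val)
    (g := fun (v g : Int) => if v = -1 ∨ v = 2 then g else v) (l := ls) (init := (-1 : Int))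
  have hmapr := List.foldr_map (f := val)
    (g := fun (g v : Int) => if g ≠ -1 ∧ g ≠ 2 then g else v) (l := ls)
    (init := (if h : ls = [] then (-1 : Int) else val (ls.getLast h)))
  rw [← hmapl, ← hmapr]
  have hlast : (if h : ls = [] then (-1 : Int) else val (ls.getLast h))
      = (ls.map val).getLastD (-1) := by
    match ls with
    | [] => rfl
    | L :: rest =>
      simp only [dif_neg (by simp : (L :: rest : List (List (List Int))) ≠ [])]
      rw [List.getLastD_eq_getLast?, List.getLast?_map,
        List.getLast?_eq_some_getLast (by simp), Option.map_some, Option.getD_some]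
  rw [hlast, foldB_char (ls.map val) (-1), foldA_char (ls.map val) (-1) (Or.inl rfl)]

-- Folding the paint passes over a map-shaped image is the pixelwise fold.
lemma pass_fold (layers : List (List (List Int))) (h w : Int) (g : Int → Int → Int) :
    layers.foldl pvPaintPass
      ((PySem.List.pyRange 0 h 1).map (fun y =>
        (y, (PySem.List.pyRange 0 w 1).map (fun x => (x, g y x)))))
    = (PySem.List.pyRange 0 h 1).map (fun y =>
        (y, (PySem.List.pyRange 0 w 1).map (fun x =>
          (x, layers.foldl (fun v L =>
                let p := PySem.List.pyGetD (PySem.List.pyGetD L y []) x 0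
                if p ≠ -1 ∧ p ≠ 2 then p else v) (g y x))))) := by
  induction layers generalizing g with
  | nil => simp
  | cons L ls ih =>
    simp only [List.foldl_cons]
    have hpass : pvPaintPass
        ((PySem.List.pyRange 0 h 1).map (fun y =>
          (y, (PySem.List.pyRange 0 w 1).map (fun x => (x, g y x))))) L
      = (PySem.List.pyRange 0 h 1).map (fun y =>
          (y, (PySem.List.pyRange 0 w 1).map (fun x =>
            (x, let p := PySem.List.pyGetD (PySem.List.pyGetD L y []) x 0
                if p ≠ -1 ∧ p ≠ 2 then p else g y x)))) := by
      simp [pvPaintPass, List.map_map, Function.comp]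
    rw [hpass, ih]

-- ===== VERDICT (by name: the statement is the Claim_ definition above) =====
theorem render_image_from_layers_spec : Claim_equal_render_image_from_layers := by
  intro layers width height _ _
  unfold Spec_render_image_from_layers render_image_from_layers render_image_from_layers_alt
  rw [pass_fold]
  refine List.map_congr_left (fun y _ => ?_)
  refine congrArg (Prod.mk y) ?_
  refine List.map_congr_left (fun x _ => ?_)
  refine congrArg (Prod.mk x) ?_
  -- A side: turn the index fold over range(len(layers)) into a fold over layers.
  have hA : (PySem.List.pyRange 0 (layers.length : Int) 1).foldl (fun v l =>
        let v1 := if v = -1 then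
            PySem.List.pyGetD (PySem.List.pyGetD (PySem.List.pyGetD layers l []) y []) x 0
          else v
        if v1 = 2 then
            PySem.List.pyGetD (PySem.List.pyGetD (PySem.List.pyGetD layers l []) y []) x 0
          else v1) (-1)
      = layers.foldl (fun v L =>
          if v = -1 ∨ v = 2 then PySem.List.pyGetD (PySem.List.pyGetD L y []) x 0 else v) (-1) := by
    refine Eq.trans (PySem.List.foldl_congr_mem _ _
        (fun v l => if v = -1 ∨ v = 2 then
            PySem.List.pyGetD (PySem.List.pyGetD (PySem.List.pyGetD layers l []) y []) x 0
          else v) (-1) (fun v l _ => ?_))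
      (PySem.List.foldl_pyRange_zero_pyGetD' layers []
        (fun v L => if v = -1 ∨ v = 2 then PySem.List.pyGetD (PySem.List.pyGetD L y []) x 0 else v)
        (-1))
    exact (step_eq _ v).trans rfl
  rw [hA]
  -- B side: fold over reversed layers is the foldr over layers.
  rw [List.foldl_reverse]
  rw [pixel_eq (fun L => PySem.List.pyGetD (PySem.List.pyGetD L y []) x 0) layers]
  match layers with
  | [] => rfl
  | L :: rest =>
    simp only [dif_neg (by simp : (L :: rest : List (List (List Int))) ≠ []),
      if_neg (by simp : ¬ (L :: rest : List (List (List Int))) = [])]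
    rw [show PySem.List.pyGetD (L :: rest) (-1) ([] : List (List Int))
          = (L :: rest).getLast (by simp) from PySem.List.pyGetD_neg_one _ _ _]
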